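-- pv_equiv track=rewrite | github.com/RitaliJ/Caltech-Me8 | week1/mancala-solitaire.py | compute_earnings
-- ===== SOURCE A (Python) =====
-- def initialize_game():
--     state = {}
--     for i in range(1, 13):
--         state[i] = i
--     return state
--
-- def compute_earnings(N):
--     earnings = 0
--     state = initialize_game()
--     curr_pos = N
--     curr_seeds = state[curr_pos]
--     state[curr_pos] = 0
--     earnings += 1
--     curr_seeds -= 1
--
--     # update the states until the current hand gets to zero...
--     # then pick up more from the next until the state that you reach has zero in it and add one to it
--     while state[curr_pos] != 0 or curr_seeds > 0:
--         if (curr_seeds) > 0: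
--             curr_pos = (curr_pos + 1) % 13
--             curr_pos = 1 if curr_pos == 0 else curr_pos
--             state[curr_pos] += 1
--             curr_seeds -= 1
--         else:
--             curr_seeds = state[curr_pos]
--             state[curr_pos] = 0
--             earnings += 1
--             curr_seeds -= 1
--
--     return earnings
-- ===== SOURCE B (Python) =====
-- def compute_earnings(N):
--     board = list(range(13))  # board[i] = i seeds in pit i (index 0 unused)
--     earnings = 0
--     pos = N
--     while True:
--         hand = board[pos] - 1
--         board[pos] = 0
--         earnings += 1
--         if hand == 0:
--             return earnings
--         q, r = divmod(hand, 12)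
--         if q:
--             for i in range(1, 13):
--                 board[i] += q
--         for k in range(1, r + 1):
--             board[(pos - 1 + k) % 12 + 1] += 1
--         pos = (pos - 1 + hand) % 12 + 1
-- ===== Notes on version B (the rewrite author's own statement) =====
-- stated objective: alternative
-- what changed: The inner one-seed-at-a-time placement loop is replaced by a divmod batch update of the twelve-pit ring (add the quotient to every pit, one extra to the first remainder-many pits after the current one) with the landing pit computed arithmetically; the board is a plain list instead of a dict.
import Mathlib
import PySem

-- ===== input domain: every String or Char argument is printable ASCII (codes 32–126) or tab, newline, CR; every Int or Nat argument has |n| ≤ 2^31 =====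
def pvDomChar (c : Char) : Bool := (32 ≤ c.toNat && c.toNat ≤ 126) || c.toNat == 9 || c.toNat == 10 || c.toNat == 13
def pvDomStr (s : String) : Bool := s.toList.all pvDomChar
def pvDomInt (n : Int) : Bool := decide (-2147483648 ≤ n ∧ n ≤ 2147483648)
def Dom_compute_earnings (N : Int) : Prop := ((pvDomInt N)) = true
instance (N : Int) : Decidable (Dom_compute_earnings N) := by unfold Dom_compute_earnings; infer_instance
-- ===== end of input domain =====

-- B replaces A's one-seed-at-a-time inner distribution loop with a divmod batch update
-- of the 12-pit ring and direct arithmetic for the landing pit (objective: alternative).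

-- ===== PORT A =====
def initialize_game : PySem.Dict Int Int :=
  (PySem.List.pyRange 1 13 1).foldl (fun st i => st.insert i i) PySem.Dict.empty

-- the while-loop of A; fuel 1000 exceeds the loop's iteration count on every admitted input
def pvLoopA (fuel : Nat) (state : PySem.Dict Int Int) (pos seeds earnings : Int) : Int :=
  match fuel with
  | 0 => earnings
  | fuel + 1 =>
    if state.getD pos 0 ≠ 0 ∨ seeds > 0 then
      if seeds > 0 then
        let p := PySem.Int.mod (pos + 1) 13
        let p := if p = 0 then 1 else p
        pvLoopA fuel (state.modify p 0 (· + 1)) p (seeds - 1) earnings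
      else
        let s := state.getD pos 0
        pvLoopA fuel (state.insert pos 0) pos (s - 1) (earnings + 1)
    else earnings

def compute_earnings (N : Int) : Int :=
  let state := initialize_game
  let seeds := state.getD N 0          -- state[N]; KeyError outside Pre_
  let state := state.insert N 0
  pvLoopA 1000 state N (seeds - 1) 1

-- ===== PORT B =====
-- the while-loop of B; fuel 100 exceeds the number of pickups on every admitted input
def pvLoopB (fuel : Nat) (board : List Int) (pos earnings : Int) : Int :=
  match fuel with
  | 0 => earnings
  | fuel + 1 =>
    let hand := PySem.List.pyGetD board pos 0 - 1
    let board := PySem.List.pySetD board pos 0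
    let earnings := earnings + 1
    if hand = 0 then earnings
    else
      let q := PySem.Int.floordiv hand 12
      let r := PySem.Int.mod hand 12
      let board :=
        if q ≠ 0 then
          (PySem.List.pyRange 1 13 1).foldl
            (fun b i => PySem.List.pySetD b i (PySem.List.pyGetD b i 0 + q)) board
        else board
      let board :=
        (PySem.List.pyRange 1 (r + 1) 1).foldl
          (fun b k =>
            let j := PySem.Int.mod (pos - 1 + k) 12 + 1
            PySem.List.pySetD b j (PySem.List.pyGetD b j 0 + 1)) board
      pvLoopB fuel board (PySem.Int.mod (pos - 1 + hand) 12 + 1) earnings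

def compute_earnings_alt (N : Int) : Int :=
  pvLoopB 100 (PySem.List.pyRange 0 13 1) N 0

-- ===== PRECONDITION & SPEC =====
-- Pre_ excludes exactly the inputs on which A raises KeyError (N not a pit number 1..12)
def Pre_compute_earnings (N : Int) : Prop := 0 < N ∧ N < 13
instance (N : Int) : Decidable (Pre_compute_earnings N) := by unfold Pre_compute_earnings; infer_instance
def pvWitness_compute_earnings : Int := 5

def Spec_compute_earnings (N : Int) (out : Int) : Prop := out = compute_earnings_alt N
instance (N : Int) (out : Int) : Decidable (Spec_compute_earnings N out) := by unfold Spec_compute_earnings; infer_instance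

-- ===== CLAIM (what is proved, stated in full; the proofs are below) =====
def Claim_equal_compute_earnings : Prop := ∀ (N : Int), Dom_compute_earnings N → Pre_compute_earnings N → Spec_compute_earnings N (compute_earnings N)

-- ===== LEMMAS AND PROOFS =====

-- ===== VERDICT (by name: the statement is the Claim_ definition above) =====
set_option maxRecDepth 10000 in
theorem compute_earnings_spec : Claim_equal_compute_earnings := by
  intro N _ hp
  obtain ⟨h1, h2⟩ := hp
  have h1 : 1 ≤ N := h1
  have h2 : N ≤ 12 := by omega
  unfold Spec_compute_earnings
  interval_cases N <;> decide
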